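-- pv_equiv track=rewrite | github.com/killmaster/adventofcode2016 | 2/day2.py | part2
-- ===== SOURCE A (Python) =====
-- matrix2 = [['E','E','1','E','E'],
--            ['E','2','3','4','E'],
--            ['5','6','7','8','9'],
--            ['E','A','B','C','E'],
--            ['E','E','D','E','E']]
--
-- def part2(lines,position):
--     result = []
--     for line in lines:
--         for c in line:
--             move = {
--                     'U': (-1,0),
--                     'D': (1,0),
--                     'R': (0,1),
--                     'L': (0,-1),
--                     }[c]
--             temp = [position[0]+move[0],position[1]+move[1]]
--             if temp[0] < 0:
--                 temp[0] = 0
--             if temp[0] > 4: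
--                 temp[0] = 4
--             if temp[1] < 0:
--                 temp[1] = 0
--             if temp[1] > 4:
--                 temp[1] = 4
--             if matrix2[temp[0]][temp[1]] != 'E':
--                 position[0] = temp[0]
--                 position[1] = temp[1]
--         result.append(matrix2[position[0]][position[1]])
--     return result
-- ===== SOURCE B (Python) =====
-- matrix2 = [['E','E','1','E','E'],
--            ['E','2','3','4','E'],
--            ['5','6','7','8','9'],
--            ['E','A','B','C','E'],
--            ['E','E','D','E','E']]
--
-- # The keypad as a literal transition graph over its key labels: for each key, where
-- # each of the four instructions leads (a move into a wall or off the pad stays put).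
-- ADJ = {'1': {'U': '1', 'D': '3', 'L': '1', 'R': '1'},
--        '2': {'U': '2', 'D': '6', 'L': '2', 'R': '3'},
--        '3': {'U': '1', 'D': '7', 'L': '2', 'R': '4'},
--        '4': {'U': '4', 'D': '8', 'L': '3', 'R': '4'},
--        '5': {'U': '5', 'D': '5', 'L': '5', 'R': '6'},
--        '6': {'U': '2', 'D': 'A', 'L': '5', 'R': '7'},
--        '7': {'U': '3', 'D': 'B', 'L': '6', 'R': '8'},
--        '8': {'U': '4', 'D': 'C', 'L': '7', 'R': '9'},
--        '9': {'U': '9', 'D': '9', 'L': '8', 'R': '9'},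
--        'A': {'U': '6', 'D': 'A', 'L': 'A', 'R': 'B'},
--        'B': {'U': '7', 'D': 'D', 'L': 'A', 'R': 'C'},
--        'C': {'U': '8', 'D': 'C', 'L': 'B', 'R': 'C'},
--        'D': {'U': 'B', 'D': 'D', 'L': 'D', 'R': 'D'}}
--
-- COORD = {'1': (0, 2), '2': (1, 1), '3': (1, 2), '4': (1, 3),
--          '5': (2, 0), '6': (2, 1), '7': (2, 2), '8': (2, 3), '9': (2, 4),
--          'A': (3, 1), 'B': (3, 2), 'C': (3, 3), 'D': (4, 2)}
--
-- def part2(lines, position):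
--     if not lines:
--         return []
--     cur = matrix2[position[0]][position[1]]
--     result = []
--     for line in lines:
--         for ch in line:
--             cur = ADJ[cur][ch]
--         result.append(cur)
--     position[0], position[1] = COORD[cur]
--     return result
-- ===== Notes on version B (the rewrite author's own statement) =====
-- stated objective: idiomatic
-- what changed: B discards the grid walk entirely: it tracks the current KEY LABEL and drives it through a hand-written literal transition graph (key -> instruction -> key, walls as self-loops), so there is no coordinate arithmetic, no clamping and no matrix probing during the walk; coordinates appear only to read the start key and to write the final position back.
-- outside the precondition, e.g. on part2(['U'], [0, 0]): A returns ['E'], B raises KeyError; on part2(['U'], [-1, 2]): A returns ['1'], B returns ['B']; on part2(['U'], [10, 2]): A returns ['D'], B raises IndexError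
import Mathlib
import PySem

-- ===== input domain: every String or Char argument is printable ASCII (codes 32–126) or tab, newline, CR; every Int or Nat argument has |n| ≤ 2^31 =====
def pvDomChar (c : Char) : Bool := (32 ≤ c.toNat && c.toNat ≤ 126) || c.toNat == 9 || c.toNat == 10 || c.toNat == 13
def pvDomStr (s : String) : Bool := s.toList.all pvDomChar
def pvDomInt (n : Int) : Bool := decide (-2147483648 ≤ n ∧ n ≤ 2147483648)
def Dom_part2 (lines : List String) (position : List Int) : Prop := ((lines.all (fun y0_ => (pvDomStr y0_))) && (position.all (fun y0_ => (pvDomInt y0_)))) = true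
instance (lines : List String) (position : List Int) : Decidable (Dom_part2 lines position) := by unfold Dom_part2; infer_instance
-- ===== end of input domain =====

-- B replaces A's coordinate walk (clamp + matrix probe per character) by a literal adjacency
-- graph over the key labels themselves; equivalence is about the RETURN value only (both
-- Pythons also write the final coordinates back into `position`).

-- ===== PORT A =====
-- the module-level constant matrix2 (shared context of both programs)
def pvMatrix2 : List (List String) :=
  [["E","E","1","E","E"],
   ["E","2","3","4","E"],
   ["5","6","7","8","9"],
   ["E","A","B","C","E"],
   ["E","E","D","E","E"]]

-- matrix2[r][c] with Python indexing; under Pre_ both indices are in 0..4, defaults never used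
def pvMatAt (r c : Int) : String :=
  (PySem.List.pyGet? ((PySem.List.pyGet? pvMatrix2 r).getD []) c).getD ""

-- the literal move dict {'U': (-1,0), …}[c]; none = KeyError (excluded by Pre_)
def pvMoveOf? (c : Char) : Option (Int × Int) :=
  if c = 'U' then some (-1, 0)
  else if c = 'D' then some (1, 0)
  else if c = 'R' then some (0, 1)
  else if c = 'L' then some (0, -1)
  else none

-- one character of A's inner loop: temp, four clamp ifs, wall test
def pvStepA (pos : Int × Int) (c : Char) : Int × Int :=
  match pvMoveOf? c with
  | none => pos
  | some mv =>
    let t0 := pos.1 + mv.1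
    let t1 := pos.2 + mv.2
    let t0 := if t0 < 0 then 0 else t0
    let t0 := if t0 > 4 then 4 else t0
    let t1 := if t1 < 0 then 0 else t1
    let t1 := if t1 > 4 then 4 else t1
    if pvMatAt t0 t1 ≠ "E" then (t0, t1) else pos

def part2 (lines : List String) (position : List Int) : List String :=
  let p0 := PySem.List.pyGetD position 0 0
  let p1 := PySem.List.pyGetD position 1 0
  (lines.foldl
    (fun (acc : List String × Int × Int) line =>
      let pos := line.toList.foldl pvStepA acc.2
      (acc.1 ++ [pvMatAt pos.1 pos.2], pos))
    ([], (p0, p1))).1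

-- ===== PORT B =====
-- B's literal transition graph: key -> each of the four instructions -> key
def pvAdj : PySem.Dict String (PySem.Dict String String) := PySem.Dict.mk [
  ("1", PySem.Dict.mk [("U","1"),("D","3"),("L","1"),("R","1")]),
  ("2", PySem.Dict.mk [("U","2"),("D","6"),("L","2"),("R","3")]),
  ("3", PySem.Dict.mk [("U","1"),("D","7"),("L","2"),("R","4")]),
  ("4", PySem.Dict.mk [("U","4"),("D","8"),("L","3"),("R","4")]),
  ("5", PySem.Dict.mk [("U","5"),("D","5"),("L","5"),("R","6")]),
  ("6", PySem.Dict.mk [("U","2"),("D","A"),("L","5"),("R","7")]),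
  ("7", PySem.Dict.mk [("U","3"),("D","B"),("L","6"),("R","8")]),
  ("8", PySem.Dict.mk [("U","4"),("D","C"),("L","7"),("R","9")]),
  ("9", PySem.Dict.mk [("U","9"),("D","9"),("L","8"),("R","9")]),
  ("A", PySem.Dict.mk [("U","6"),("D","A"),("L","A"),("R","B")]),
  ("B", PySem.Dict.mk [("U","7"),("D","D"),("L","A"),("R","C")]),
  ("C", PySem.Dict.mk [("U","8"),("D","C"),("L","B"),("R","C")]),
  ("D", PySem.Dict.mk [("U","B"),("D","D"),("L","D"),("R","D")])]

-- cur = ADJ[cur][ch]  (a missing key at either level is Python's KeyError, excluded by Pre_)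
def pvStepB (cur : String) (ch : Char) : String :=
  (((pvAdj.get? cur).getD PySem.Dict.empty).get? (String.singleton ch)).getD cur

def part2_alt (lines : List String) (position : List Int) : List String :=
  if lines = [] then []
  else
    let cur := pvMatAt (PySem.List.pyGetD position 0 0) (PySem.List.pyGetD position 1 0)
    (lines.foldl
      (fun (acc : List String × String) line =>
        let cur := line.toList.foldl pvStepB acc.2
        (acc.1 ++ [cur], cur))
      ([], cur)).1

-- ===== PRECONDITION & SPEC =====
-- When lines ≠ [], Pre_ requires at least two coordinates and every character in 'UDLR'
-- (otherwise A raises IndexError/KeyError), and that the start is a KEY of the pad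
-- (both coordinates in 0..4 on a non-'E' cell) — the keypad's natural domain: B's
-- key-graph has no state for off-pad starts and raises there (or, via Python negative
-- indexing, reads a different cell), while A's values there come from clamp-teleporting
-- and negative-index wraparound.
def Pre_part2 (lines : List String) (position : List Int) : Prop :=
  lines = [] ∨
  (2 ≤ position.length ∧
   0 ≤ position.getD 0 0 ∧ position.getD 0 0 ≤ 4 ∧
   0 ≤ position.getD 1 0 ∧ position.getD 1 0 ≤ 4 ∧
   pvMatAt (position.getD 0 0) (position.getD 1 0) ≠ "E" ∧
   lines.all (fun s => s.toList.all (fun ch => ch == 'U' || ch == 'D' || ch == 'L' || ch == 'R')) = true)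
instance (lines : List String) (position : List Int) : Decidable (Pre_part2 lines position) := by
  unfold Pre_part2; infer_instance

def pvWitness_part2 : List String × List Int := (["ULL", "RRDDD"], [2, 2])

def Spec_part2 (lines : List String) (position : List Int) (out : List String) : Prop :=
  out = part2_alt lines position
instance (lines : List String) (position : List Int) (out : List String) :
    Decidable (Spec_part2 lines position out) := by unfold Spec_part2; infer_instance

-- ===== CLAIM (what is proved, stated in full; the proofs are below) =====
def Claim_equal_part2 : Prop := ∀ (lines : List String) (position : List Int),
  Dom_part2 lines position → Pre_part2 lines position → Spec_part2 lines position (part2 lines position)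

-- ===== LEMMAS AND PROOFS =====
-- the 13 key cells of the pad
def pvKeyCells : List (Int × Int) :=
  [(0,2),(1,1),(1,2),(1,3),(2,0),(2,1),(2,2),(2,3),(2,4),(3,1),(3,2),(3,3),(4,2)]

-- one finite check: from any key cell, on any move character, A's step lands on a key cell
-- and B's label step mirrors it through pvMatAt
theorem pvStep_table :
    (pvKeyCells.all (fun p => (['U','D','L','R'] : List Char).all (fun ch =>
      decide (pvStepA p ch ∈ pvKeyCells) &&
      (pvStepB (pvMatAt p.1 p.2) ch == pvMatAt (pvStepA p ch).1 (pvStepA p ch).2)))) = true := by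
  decide

theorem pvStep_key (p : Int × Int) (hp : p ∈ pvKeyCells) (ch : Char)
    (hch : ch = 'U' ∨ ch = 'D' ∨ ch = 'L' ∨ ch = 'R') :
    pvStepA p ch ∈ pvKeyCells ∧
      pvStepB (pvMatAt p.1 p.2) ch = pvMatAt (pvStepA p ch).1 (pvStepA p ch).2 := by
  have h1 := List.all_eq_true.mp pvStep_table p hp
  have hc : ch ∈ (['U','D','L','R'] : List Char) := by
    rcases hch with rfl | rfl | rfl | rfl <;> decide
  have h2 := List.all_eq_true.mp h1 ch hc
  rcases (Bool.and_eq_true _ _).mp h2 with ⟨ha, hb⟩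
  exact ⟨of_decide_eq_true ha, eq_of_beq hb⟩

theorem pvChars_eq (s : List Char) (p : Int × Int) (hp : p ∈ pvKeyCells)
    (hs : ∀ ch ∈ s, ch = 'U' ∨ ch = 'D' ∨ ch = 'L' ∨ ch = 'R') :
    s.foldl pvStepA p ∈ pvKeyCells ∧
      s.foldl pvStepB (pvMatAt p.1 p.2) =
        pvMatAt (s.foldl pvStepA p).1 (s.foldl pvStepA p).2 := by
  induction s generalizing p with
  | nil => exact ⟨hp, rfl⟩
  | cons ch s ih =>
    obtain ⟨hk, he⟩ := pvStep_key p hp ch (hs ch (List.mem_cons_self ..))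
    rw [List.foldl_cons, List.foldl_cons, he]
    exact ih _ hk (fun x hx => hs x (List.mem_cons_of_mem _ hx))

theorem pvLines_eq (lines : List String) (acc : List String) (p : Int × Int)
    (hp : p ∈ pvKeyCells)
    (hl : ∀ s ∈ lines, ∀ ch ∈ s.toList, ch = 'U' ∨ ch = 'D' ∨ ch = 'L' ∨ ch = 'R') :
    (lines.foldl
      (fun (acc : List String × Int × Int) line =>
        let pos := line.toList.foldl pvStepA acc.2
        (acc.1 ++ [pvMatAt pos.1 pos.2], pos)) (acc, p)).1 =
    (lines.foldl
      (fun (acc : List String × String) line =>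
        let cur := line.toList.foldl pvStepB acc.2
        (acc.1 ++ [cur], cur)) (acc, pvMatAt p.1 p.2)).1 := by
  induction lines generalizing acc p with
  | nil => rfl
  | cons s rest ih =>
    obtain ⟨hk, he⟩ := pvChars_eq s.toList p hp (hl s (List.mem_cons_self ..))
    simp only [List.foldl_cons, he]
    exact ih _ _ hk (fun t ht => hl t (List.mem_cons_of_mem _ ht))

-- an in-range non-'E' start is one of the 13 key cells
theorem pvStart_key (r c : Int) (hr0 : 0 ≤ r) (hr4 : r ≤ 4) (hc0 : 0 ≤ c) (hc4 : c ≤ 4)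
    (hE : pvMatAt r c ≠ "E") : (r, c) ∈ pvKeyCells := by
  interval_cases r <;> interval_cases c <;> first | (exfalso; exact hE (by decide)) | decide

-- ===== VERDICT (by name: the statement is the Claim_ definition above) =====
theorem part2_spec : Claim_equal_part2 := by
  intro lines position _ hpre
  unfold Spec_part2 part2 part2_alt
  rcases hpre with rfl | ⟨_, hr0, hr4, hc0, hc4, hE, hall⟩
  · rfl
  · by_cases hnil : lines = []
    · subst hnil; rfl
    · simp only [if_neg hnil, PySem.List.pyGetD_ofNat']
      have hl : ∀ s ∈ lines, ∀ ch ∈ s.toList, ch = 'U' ∨ ch = 'D' ∨ ch = 'L' ∨ ch = 'R' := by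
        intro s hs ch hc
        have h2 := List.all_eq_true.mp (List.all_eq_true.mp hall s hs) ch hc
        simpa [or_assoc] using h2
      exact pvLines_eq lines [] (position.getD 0 0, position.getD 1 0)
        (pvStart_key _ _ hr0 hr4 hc0 hc4 hE) hl
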